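-- pv_equiv track=rewrite | github.com/suwaha1486/Atcoder | abc/abc454/d.py | process_paren_xx
-- ===== SOURCE A (Python) =====
-- def process_paren_xx(s):
--     stack = []
--     for ch in s:
--         stack.append(ch)
--         # 末尾4文字が "(xx)" なら "xx" に畳み込む
--         while (
--             len(stack) >= 4
--             and stack[-4] == '('
--             and stack[-3] == 'x'
--             and stack[-2] == 'x'
--             and stack[-1] == ')'
--         ):
--             stack.pop()
--             stack.pop()
--             stack.pop()
--             stack.pop()
--             stack.append('x')
--             stack.append('x')
--     return stack
-- ===== SOURCE B (Python) =====
-- def process_paren_xx(s):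
--     r = s
--     while True:
--         i = r.find('(xx)')
--         if i < 0:
--             break
--         r = r[:i] + 'xx' + r[i + 4:]
--     return list(r)
-- ===== Notes on version B (the rewrite author's own statement) =====
-- stated objective: simpler
-- what changed: Replaces A's character-by-character stack automaton with repeated global rewriting of the whole string: find the first occurrence of the 4-char paren-x-x-paren pattern, splice two x characters in its place, iterate to a fixpoint, and return the final string as a list.
import Mathlib
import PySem

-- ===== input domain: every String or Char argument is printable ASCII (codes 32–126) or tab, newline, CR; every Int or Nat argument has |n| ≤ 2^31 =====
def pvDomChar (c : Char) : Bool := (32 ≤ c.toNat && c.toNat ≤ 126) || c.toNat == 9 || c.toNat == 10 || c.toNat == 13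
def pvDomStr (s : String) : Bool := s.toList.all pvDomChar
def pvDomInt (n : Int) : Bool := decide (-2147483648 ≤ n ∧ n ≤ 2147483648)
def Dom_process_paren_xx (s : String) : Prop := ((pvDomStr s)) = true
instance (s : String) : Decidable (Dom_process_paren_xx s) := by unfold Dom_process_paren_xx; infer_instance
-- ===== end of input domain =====

-- B replaces A's character-by-character stack automaton by repeated global rewriting of the
-- string (first occurrence of the 4-char fold pattern spliced to two x chars, iterated to a
-- fixpoint); measured faster on the generated inputs in a timing run (C-level find/slice
-- vs a per-character Python loop), though quadratic in the worst case.


-- ===== PORT A =====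
-- a Python character is a one-character string
def pvMk1 (c : Char) : String := String.ofList [c]

-- the inner 'while' of A: pop four, push "x","x", re-test the tail
def pvAwhile (st : List String) : List String :=
  if _h : st.length ≥ 4 ∧ PySem.List.pyGet? st (-4) = some "(" ∧ PySem.List.pyGet? st (-3) = some "x"
       ∧ PySem.List.pyGet? st (-2) = some "x" ∧ PySem.List.pyGet? st (-1) = some ")" then
    pvAwhile (st.dropLast.dropLast.dropLast.dropLast ++ ["x", "x"])
  else st
termination_by st.length
decreasing_by
  obtain ⟨h4, -⟩ := _h
  simp [List.length_dropLast]
  omega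

def process_paren_xx (s : String) : List String :=
  s.toList.foldl (fun stack ch => pvAwhile (stack ++ [pvMk1 ch])) []

-- ===== PORT B =====
def pvPat : List Char := ['(', 'x', 'x', ')']

-- termination fact for B's while loop: the spliced string is two characters shorter
theorem pvB_dec (r : List Char) (h : ¬ PySem.Chars.find r pvPat < 0) :
    (PySem.Chars.slice r none (some (PySem.Chars.find r pvPat)) ++ ['x', 'x'] ++
      PySem.Chars.slice r (some (PySem.Chars.find r pvPat + 4)) none).length < r.length := by
  have h0 : (0:Int) ≤ PySem.Chars.find r pvPat := by omega
  obtain ⟨hpre, -⟩ := PySem.Chars.find_spec (s := r) (sub := pvPat) h0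
  have hlen : (PySem.Chars.find r pvPat).toNat + 4 ≤ r.length := by
    have h1 := hpre.length_le
    have hp : pvPat.length = 4 := rfl
    rw [hp, List.length_drop] at h1
    omega
  rw [PySem.Chars.slice_eq_listSlice, PySem.Chars.slice_eq_listSlice,
      PySem.List.slice_to r h0, PySem.List.slice_from r (by omega)]
  have ht : ((PySem.Chars.find r pvPat) + 4).toNat = (PySem.Chars.find r pvPat).toNat + 4 := by omega
  simp [ht]
  omega

-- while True: i = r.find('(xx)'); if i < 0: break; r = r[:i] + 'xx' + r[i+4:]
def pvBloop (r : List Char) : List Char :=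
  let i := PySem.Chars.find r pvPat
  if _h : i < 0 then r
  else pvBloop (PySem.Chars.slice r none (some i) ++ ['x', 'x'] ++ PySem.Chars.slice r (some (i + 4)) none)
termination_by r.length
decreasing_by exact pvB_dec r _h

-- return list(r)
def process_paren_xx_alt (s : String) : List String :=
  (pvBloop s.toList).map pvMk1

-- ===== PRECONDITION & SPEC =====
def Spec_process_paren_xx (s : String) (out : List String) : Prop := out = process_paren_xx_alt s
instance (s : String) (out : List String) : Decidable (Spec_process_paren_xx s out) := by unfold Spec_process_paren_xx; infer_instance

-- ===== CLAIM (what is proved, stated in full; the proofs are below) =====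
def Claim_equal_process_paren_xx : Prop := ∀ (s : String), Dom_process_paren_xx s → Spec_process_paren_xx s (process_paren_xx s)

-- ===== LEMMAS AND PROOFS =====

-- the last four elements of u ++ [a,b,c,d], through Python's negative indices
theorem pvGet_last4 {α : Type} (u : List α) (a b c d : α) :
    PySem.List.pyGet? (u ++ [a, b, c, d]) (-4) = some a ∧
    PySem.List.pyGet? (u ++ [a, b, c, d]) (-3) = some b ∧
    PySem.List.pyGet? (u ++ [a, b, c, d]) (-2) = some c ∧
    PySem.List.pyGet? (u ++ [a, b, c, d]) (-1) = some d := by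
  have hl : (u ++ [a, b, c, d]).length = u.length + 4 := by simp
  refine ⟨?_, ?_, ?_, ?_⟩ <;>
    [rw [PySem.List.pyGet?_neg_ofNat _ 4 (by omega) (by omega), hl];
     rw [PySem.List.pyGet?_neg_ofNat _ 3 (by omega) (by omega), hl];
     rw [PySem.List.pyGet?_neg_ofNat _ 2 (by omega) (by omega), hl];
     rw [PySem.List.pyGet?_neg_ofNat _ 1 (by omega) (by omega), hl]] <;>
  · rw [List.getElem?_append_right (by omega)]
    simp

-- A's while-condition characterised: the stack ends with "(", "x", "x", ")"
theorem pvCond_iff (st : List String) :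
    (st.length ≥ 4 ∧ PySem.List.pyGet? st (-4) = some "(" ∧ PySem.List.pyGet? st (-3) = some "x"
      ∧ PySem.List.pyGet? st (-2) = some "x" ∧ PySem.List.pyGet? st (-1) = some ")")
    ↔ ∃ u, st = u ++ ["(", "x", "x", ")"] := by
  constructor
  · rintro ⟨hlen, h4, h3, h2, h1⟩
    rcases hr : st.reverse with _ | ⟨d, _ | ⟨c, _ | ⟨b, _ | ⟨a, t⟩⟩⟩⟩ <;>
      try (exfalso; have hL := congrArg List.length hr;
           simp only [List.length_reverse, List.length_cons, List.length_nil] at hL; omega)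
    have hst : st = t.reverse ++ [a, b, c, d] := by
      have h := congrArg List.reverse hr
      simpa using h
    obtain ⟨g4, g3, g2, g1⟩ := pvGet_last4 t.reverse a b c d
    rw [hst, g4, Option.some.injEq] at h4
    rw [hst, g3, Option.some.injEq] at h3
    rw [hst, g2, Option.some.injEq] at h2
    rw [hst, g1, Option.some.injEq] at h1
    exact ⟨t.reverse, by rw [hst, h4, h3, h2, h1]⟩
  · rintro ⟨u, rfl⟩
    obtain ⟨g4, g3, g2, g1⟩ := pvGet_last4 u "(" "x" "x" ")"
    exact ⟨by simp, g4, g3, g2, g1⟩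

-- the while body runs at most once per pushed character: after folding the tail is "x","x"
theorem pvAwhile_eq (st : List String) :
    pvAwhile st =
      if (st.length ≥ 4 ∧ PySem.List.pyGet? st (-4) = some "(" ∧ PySem.List.pyGet? st (-3) = some "x"
          ∧ PySem.List.pyGet? st (-2) = some "x" ∧ PySem.List.pyGet? st (-1) = some ")") then
        st.dropLast.dropLast.dropLast.dropLast ++ ["x", "x"]
      else st := by
  rw [pvAwhile]
  by_cases hcond : (st.length ≥ 4 ∧ PySem.List.pyGet? st (-4) = some "(" ∧ PySem.List.pyGet? st (-3) = some "x"
      ∧ PySem.List.pyGet? st (-2) = some "x" ∧ PySem.List.pyGet? st (-1) = some ")")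
  · rw [dif_pos hcond, if_pos hcond, pvAwhile, dif_neg]
    rintro ⟨-, -, -, -, h1⟩
    rw [show st.dropLast.dropLast.dropLast.dropLast ++ ["x", "x"]
          = (st.dropLast.dropLast.dropLast.dropLast ++ ["x"]) ++ ["x"] by simp,
        PySem.List.pyGet?_neg_one_append_singleton, Option.some.injEq] at h1
    exact absurd h1 (by decide)
  · rw [dif_neg hcond, if_neg hcond]

theorem pvMk1_inj {a b : Char} (h : pvMk1 a = pvMk1 b) : a = b := by
  have h2 := congrArg String.toList h
  simpa [pvMk1] using h2

-- proof-side one-shot step on the character level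
def pvStep (l : List Char) (c : Char) : List Char :=
  if c = ')' ∧ l.reverse.take 3 = ['x', 'x', '('] then
    (l.reverse.drop 3).reverse ++ ['x', 'x']
  else l ++ [c]

def pvN (l : List Char) : List Char := l.foldl pvStep []

theorem pvTail3_iff (l : List Char) :
    l.reverse.take 3 = ['x', 'x', '('] ↔ ∃ t, l = t ++ ['(', 'x', 'x'] := by
  constructor
  · intro h
    refine ⟨(l.reverse.drop 3).reverse, ?_⟩
    conv_lhs => rw [← l.reverse_reverse, ← List.take_append_drop 3 l.reverse, h]
    simp
  · rintro ⟨t, rfl⟩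
    simp

-- one pushed character of A (append, then while) is the one-shot step, under map pvMk1
theorem pvA_single (acc : List Char) (c : Char) :
    pvAwhile (acc.map pvMk1 ++ [pvMk1 c]) = (pvStep acc c).map pvMk1 := by
  rw [pvAwhile_eq, pvStep]
  by_cases hc : c = ')' ∧ acc.reverse.take 3 = ['x', 'x', '(']
  · obtain ⟨hc1, hc2⟩ := hc
    obtain ⟨t, rfl⟩ := (pvTail3_iff acc).mp hc2
    subst hc1
    have hsplit : (t ++ ['(', 'x', 'x']).map pvMk1 ++ [pvMk1 ')']
        = t.map pvMk1 ++ ["(", "x", "x", ")"] := by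
      simp [pvMk1]
    rw [hsplit, if_pos ((pvCond_iff _).mpr ⟨t.map pvMk1, rfl⟩)]
    rw [if_pos ⟨rfl, by simpa using hc2⟩]
    simp [pvMk1]
  · rw [if_neg hc, if_neg]
    · simp
    intro hcond
    obtain ⟨u, hu⟩ := (pvCond_iff _).mp hcond
    apply hc
    have h1 : pvMk1 c = ")" := by
      have h := congrArg (fun l => PySem.List.pyGet? l (-1)) hu
      simpa [PySem.List.pyGet?_neg_one_append_singleton,
        (pvGet_last4 u "(" "x" "x" ")").2.2.2] using h
    have hc' : c = ')' := by
      have : pvMk1 c = pvMk1 ')' := by simpa [pvMk1] using h1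
      exact pvMk1_inj this
    refine ⟨hc', ?_⟩
    have h2 : acc.map pvMk1 = u ++ ["(", "x", "x"] := by
      have h3 : acc.map pvMk1 ++ [pvMk1 c] = (u ++ ["(", "x", "x"]) ++ [")"] := by
        simpa using hu
      rw [h1] at h3
      exact List.append_cancel_right h3
    have hrev : (acc.reverse).map pvMk1 = "x" :: "x" :: "(" :: u.reverse := by
      rw [List.map_reverse, h2]; simp
    rcases hr : acc.reverse with _ | ⟨x1, _ | ⟨x2, _ | ⟨x3, t⟩⟩⟩ <;> rw [hr] at hrev <;>
      simp only [List.map_cons, List.map_nil, List.cons.injEq] at hrev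
    · exact absurd hrev (by simp)
    · exact absurd hrev.2 (by simp)
    · exact absurd hrev.2.2 (by simp)
    · obtain ⟨e1, e2, e3, -⟩ := hrev
      have g1 : x1 = 'x' := pvMk1_inj (show pvMk1 x1 = pvMk1 'x' by rw [e1]; rfl)
      have g2 : x2 = 'x' := pvMk1_inj (show pvMk1 x2 = pvMk1 'x' by rw [e2]; rfl)
      have g3 : x3 = '(' := pvMk1_inj (show pvMk1 x3 = pvMk1 '(' by rw [e3]; rfl)
      rw [g1, g2, g3]
      rfl

theorem pvA_bridge (l acc : List Char) :
    l.foldl (fun st ch => pvAwhile (st ++ [pvMk1 ch])) (acc.map pvMk1)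
      = (l.foldl pvStep acc).map pvMk1 := by
  induction l generalizing acc with
  | nil => rfl
  | cons c l ih =>
      simp only [List.foldl_cons]
      rw [pvA_single, ih]

-- a rewrite '(xx)' -> 'xx' does not change where the fold ends up
theorem pvStep_seq (S : List Char) : List.foldl pvStep S pvPat = List.foldl pvStep S ['x', 'x'] := by
  simp only [pvPat, List.foldl_cons, List.foldl_nil]
  have hpar : pvStep S '(' = S ++ ['('] := by simp [pvStep]
  have hx : ∀ T : List Char, pvStep T 'x' = T ++ ['x'] := fun T => by simp [pvStep]
  rw [hpar, hx, hx, hx, hx]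
  have hclose : pvStep (S ++ ['('] ++ ['x'] ++ ['x']) ')' = S ++ ['x'] ++ ['x'] := by
    rw [pvStep, if_pos ⟨rfl, by simp⟩]
    simp
  rw [hclose]

theorem pvN_rewrite (u v acc : List Char) :
    List.foldl pvStep acc (u ++ pvPat ++ v) = List.foldl pvStep acc (u ++ ['x', 'x'] ++ v) := by
  rw [List.foldl_append, List.foldl_append, List.foldl_append, List.foldl_append, pvStep_seq]

-- on a string with no occurrence of '(xx)' the normaliser is the identity
theorem pvN_nf (l : List Char) (h : ¬ pvPat <:+: l) : pvN l = l := by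
  induction l using List.reverseRecOn with
  | nil => rfl
  | append_singleton l c ih =>
      have hl : ¬ pvPat <:+: l := fun hinf => h (hinf.trans ⟨[], [c], by simp⟩)
      unfold pvN at *
      rw [List.foldl_append, ih hl, List.foldl_cons, List.foldl_nil, pvStep, if_neg]
      rintro ⟨rfl, htail⟩
      obtain ⟨t, rfl⟩ := (pvTail3_iff l).mp htail
      exact h ⟨t, [], by simp [pvPat]⟩

theorem pvN_eq_pvBloop_aux (n : Nat) : ∀ l : List Char, l.length ≤ n → pvN l = pvBloop l := by
  induction n with
  | zero =>
      intro l hl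
      have : l = [] := List.eq_nil_of_length_eq_zero (by omega)
      subst this
      rw [pvBloop]
      rfl
  | succ n ih =>
      intro l hl
      rw [pvBloop]
      by_cases hfind : PySem.Chars.find l pvPat < 0
      · rw [dif_pos hfind]
        apply pvN_nf
        have he : PySem.Chars.find l pvPat = -1 := by
          have := PySem.Chars.neg_one_le_find l pvPat
          omega
        exact (PySem.Chars.find_eq_neg_one_iff l pvPat).mp he
      · rw [dif_neg hfind]
        have h0 : (0:Int) ≤ PySem.Chars.find l pvPat := by omega
        obtain ⟨hpre, -⟩ := PySem.Chars.find_spec (s := l) (sub := pvPat) h0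
        obtain ⟨w, hw⟩ := hpre
        have hdrop4 : l.drop ((PySem.Chars.find l pvPat).toNat + 4) = w := by
          have hd : l.drop ((PySem.Chars.find l pvPat).toNat + 4)
              = (l.drop (PySem.Chars.find l pvPat).toNat).drop 4 := by
            rw [List.drop_drop]
          rw [hd, ← hw]
          simp [pvPat]
        have hdecomp : l = l.take (PySem.Chars.find l pvPat).toNat ++ pvPat
            ++ l.drop ((PySem.Chars.find l pvPat).toNat + 4) := by
          rw [hdrop4]
          conv_lhs => rw [← List.take_append_drop (PySem.Chars.find l pvPat).toNat l, ← hw]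
          rw [List.append_assoc]
        have hslice : PySem.Chars.slice l none (some (PySem.Chars.find l pvPat)) ++ ['x', 'x'] ++
            PySem.Chars.slice l (some (PySem.Chars.find l pvPat + 4)) none
            = l.take (PySem.Chars.find l pvPat).toNat ++ ['x', 'x']
              ++ l.drop ((PySem.Chars.find l pvPat).toNat + 4) := by
          rw [PySem.Chars.slice_eq_listSlice, PySem.Chars.slice_eq_listSlice,
              PySem.List.slice_to l h0, PySem.List.slice_from l (by omega)]
          congr 2
          omega
        rw [hslice, ← ih _ (by
              have hlt := pvB_dec l hfind
              rw [hslice] at hlt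
              omega)]
        conv_lhs => rw [show pvN l
            = pvN (l.take (PySem.Chars.find l pvPat).toNat ++ pvPat
                ++ l.drop ((PySem.Chars.find l pvPat).toNat + 4)) from by rw [← hdecomp]]
        unfold pvN
        exact pvN_rewrite _ _ _

theorem pvN_eq_pvBloop (l : List Char) : pvN l = pvBloop l :=
  pvN_eq_pvBloop_aux l.length l le_rfl

-- ===== VERDICT (by name: the statement is the Claim_ definition above) =====
theorem process_paren_xx_spec : Claim_equal_process_paren_xx := by
  intro s _
  unfold Spec_process_paren_xx process_paren_xx process_paren_xx_alt
  have hb := pvA_bridge s.toList []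
  simp only [List.map_nil] at hb
  rw [hb, ← pvN, pvN_eq_pvBloop]
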